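-- pv_equiv track=rewrite | github.com/m-franc/kata | comfortable_words.py | comfortable_word
-- ===== SOURCE A (Python) =====
-- def comfortable_word(word):
--     left = "qwertasdfgzxcvb"
--     fst_lft_meet = 0
--     ix_last_lft = 0
--     fst_rgt_meet = 0
--     ix_last_rgt = 0
--     for i, c in enumerate(word):
--         # when meeting left char for the first time
--         if c in left and fst_lft_meet == 0:
--             ix_last_lft = i
--             fst_lft_meet = 1
--         # when meeting left char
--         elif c in left and fst_lft_meet != 0:
--             if i == ix_last_lft + 1:
--                 return False
--             ix_last_lft = i
--         # when meeting right char for the first time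
--         if c not in left and fst_rgt_meet == 0:
--             ix_last_rgt = i
--             fst_rgt_meet = 1
--         # when meeting right char
--         elif c not in left and fst_rgt_meet != 0:
--             if i == ix_last_rgt + 1:
--                 return False
--             ix_last_rgt = i
--     return True
-- ===== SOURCE B (Python) =====
-- def comfortable_word(word):
--     left = "qwertasdfgzxcvb"
--     for a, b in zip(word, word[1:]):
--         if (a in left) == (b in left):
--             return False
--     return True
-- ===== Notes on version B (the rewrite author's own statement) =====
-- stated objective: simpler
-- what changed: Replaced the four-state-variable last-index-tracking scan by a direct pairwise check over zip(word, word[1:]) that returns False on the first adjacent same-side pair.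
import Mathlib
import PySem

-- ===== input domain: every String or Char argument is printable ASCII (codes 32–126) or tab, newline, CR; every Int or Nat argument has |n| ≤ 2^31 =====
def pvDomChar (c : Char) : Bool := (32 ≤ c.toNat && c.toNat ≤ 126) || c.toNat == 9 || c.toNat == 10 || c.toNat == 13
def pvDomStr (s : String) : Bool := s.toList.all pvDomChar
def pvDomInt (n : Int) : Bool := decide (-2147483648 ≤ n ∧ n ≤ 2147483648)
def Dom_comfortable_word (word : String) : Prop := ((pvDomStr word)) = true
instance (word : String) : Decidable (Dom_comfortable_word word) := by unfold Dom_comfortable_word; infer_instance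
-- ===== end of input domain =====

-- B is a simpler pairwise-adjacency decomposition of the same check (return value only; no mutation).

-- ===== PORT A =====
-- `c in left` for the fixed ASCII string left = "qwertasdfgzxcvb"
def cwIsLeft (c : Char) : Bool := "qwertasdfgzxcvb".toList.contains c

-- the for-loop of A: state (fst_lft_meet, ix_last_lft, fst_rgt_meet, ix_last_rgt), early return = false
def cwLoopA : List Char → Int → Int → Int → Int → Int → Bool
  | [], _, _, _, _, _ => true
  | c :: rest, i, fl, il, fr, ir =>
    let L := cwIsLeft c
    -- first if/elif block (on `c in left`); none = `return False`
    let r1 : Option (Int × Int) :=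
      if L && (fl == 0) then some (1, i)
      else if L && !(fl == 0) then (if i == il + 1 then none else some (fl, i))
      else some (fl, il)
    match r1 with
    | none => false
    | some (fl', il') =>
      -- second if/elif block (on `c not in left`)
      if (!L) && (fr == 0) then cwLoopA rest (i + 1) fl' il' 1 i
      else if (!L) && !(fr == 0) then
        (if i == ir + 1 then false else cwLoopA rest (i + 1) fl' il' fr i)
      else cwLoopA rest (i + 1) fl' il' fr ir

def comfortable_word (word : String) : Bool := cwLoopA word.toList 0 0 0 0 0

-- ===== PORT B =====
-- `for a, b in zip(word, word[1:])`
def cwPairs : List (Char × Char) → Bool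
  | [] => true
  | (a, b) :: rest => if cwIsLeft a == cwIsLeft b then false else cwPairs rest

def comfortable_word_alt (word : String) : Bool :=
  cwPairs (word.toList.zip word.toList.tail)

-- ===== PRECONDITION & SPEC =====
def Spec_comfortable_word (word : String) (out : Bool) : Prop := out = comfortable_word_alt word
instance (word : String) (out : Bool) : Decidable (Spec_comfortable_word word out) := by unfold Spec_comfortable_word; infer_instance

-- ===== CLAIM (what is proved, stated in full; the proofs are below) =====
def Claim_equal_comfortable_word : Prop := ∀ (word : String), Dom_comfortable_word word → Spec_comfortable_word word (comfortable_word word)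

-- ===== LEMMAS AND PROOFS =====

/-- Loop invariant: after A has processed the characters before index `i`, with `p` the character
at index `i - 1`, its state records exactly the side and position of `p` (and the other side's
last index, if any, is not `i - 1`); then the rest of the loop computes the pairwise check. -/
lemma cwLoopA_inv (rest : List Char) : ∀ (p : Char) (i fl il fr ir : Int),
    (fl = 0 ∨ fl = 1) → (fr = 0 ∨ fr = 1) →
    (cwIsLeft p = true → fl = 1 ∧ il = i - 1 ∧ (fr ≠ 0 → ir ≠ i - 1)) →
    (cwIsLeft p = false → fr = 1 ∧ ir = i - 1 ∧ (fl ≠ 0 → il ≠ i - 1)) →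
    cwLoopA rest i fl il fr ir = cwPairs ((p :: rest).zip rest) := by
  induction rest with
  | nil => intro p i fl il fr ir _ _ _ _; simp [cwLoopA, cwPairs]
  | cons c rest ih =>
    intro p i fl il fr ir hfl hfr hL hR
    by_cases hp : cwIsLeft p = true
    · obtain ⟨hfl1, hil, hir⟩ := hL hp
      by_cases hc : cwIsLeft c = true
      · -- both left: A fires i = il + 1; B fires same-side pair
        simp [cwLoopA, cwPairs, hc, hp, hfl1, hil]
      · -- p left, c right
        have hc' : cwIsLeft c = false := by simpa using hc
        have hrec := ih c (i + 1) 1 il 1 i (Or.inr rfl) (Or.inr rfl)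
          (by simp [hc']) (fun _ => ⟨rfl, by ring, fun _ => by omega⟩)
        rcases hfr with hfr0 | hfr1
        · simp [cwLoopA, cwPairs, hp, hc', hfl1, hfr0]; exact hrec
        · have hir' : (i == ir + 1) = false := by
            have := hir (by omega); simp; omega
          simp [cwLoopA, cwPairs, hp, hc', hfl1, hfr1, hir']; exact hrec
    · have hp' : cwIsLeft p = false := by simpa using hp
      obtain ⟨hfr1, hir, hil⟩ := hR hp'
      by_cases hc : cwIsLeft c = true
      · -- p right, c left
        have hrec := ih c (i + 1) 1 i 1 ir (Or.inr rfl) (Or.inr rfl)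
          (fun _ => ⟨rfl, by ring, fun _ => by omega⟩) (by simp [hc])
        rcases hfl with hfl0 | hfl1
        · simp [cwLoopA, cwPairs, hp', hc, hfl0, hfr1]; exact hrec
        · have hil' : (i == il + 1) = false := by
            have := hil (by omega); simp; omega
          simp [cwLoopA, cwPairs, hp', hc, hfl1, hfr1, hil']; exact hrec
      · -- both right: A fires i = ir + 1; B fires same-side pair
        have hc' : cwIsLeft c = false := by simpa using hc
        simp [cwLoopA, cwPairs, hc', hp', hfr1, hir]

-- ===== VERDICT (by name: the statement is the Claim_ definition above) =====
theorem comfortable_word_spec : Claim_equal_comfortable_word := by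
  intro word _
  unfold Spec_comfortable_word comfortable_word comfortable_word_alt
  cases h : word.toList with
  | nil => simp [cwLoopA, cwPairs]
  | cons c rest =>
    by_cases hc : cwIsLeft c = true
    · have hrec := cwLoopA_inv rest c 1 1 0 0 0 (Or.inr rfl) (Or.inl rfl)
        (fun _ => ⟨rfl, by ring, fun h => absurd rfl h⟩) (by simp [hc])
      simp [cwLoopA, hc, hrec]
    · have hc' : cwIsLeft c = false := by simpa using hc
      have hrec := cwLoopA_inv rest c 1 0 0 1 0 (Or.inl rfl) (Or.inr rfl)
        (by simp [hc']) (fun _ => ⟨rfl, by ring, fun h => absurd rfl h⟩)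
      simp [cwLoopA, hc', hrec]
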